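-- pv_equiv track=rewrite | github.com/dongjun-Yi/Algorithm | 프로그래머스/1/159994. 카드 뭉치/카드 뭉치.py | solution
-- ===== SOURCE A (Python) =====
-- def solution(cards1, cards2, goal):
--     for g in goal:
--         if cards1 and g == cards1[0]:
--             cards1.remove(g)
--         elif cards2 and g == cards2[0]:
--             cards2.remove(g)
--         else:
--             return "No"
--     return "Yes"
-- ===== SOURCE B (Python) =====
-- def solution(cards1, cards2, goal):
--     i = j = 0
--     for g in goal:
--         if i < len(cards1) and cards1[i] == g:
--             i += 1
--         elif j < len(cards2) and cards2[j] == g: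
--             j += 1
--         else:
--             return "No"
--     return "Yes"
-- ===== Notes on version B (the rewrite author's own statement) =====
-- stated objective: alternative
-- what changed: Replaces consuming the card stacks with list.remove (which shifts elements and mutates the inputs) by two advancing index pointers into the untouched lists; avoids the per-match O(n) shift and the in-place mutation.
import Mathlib
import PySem

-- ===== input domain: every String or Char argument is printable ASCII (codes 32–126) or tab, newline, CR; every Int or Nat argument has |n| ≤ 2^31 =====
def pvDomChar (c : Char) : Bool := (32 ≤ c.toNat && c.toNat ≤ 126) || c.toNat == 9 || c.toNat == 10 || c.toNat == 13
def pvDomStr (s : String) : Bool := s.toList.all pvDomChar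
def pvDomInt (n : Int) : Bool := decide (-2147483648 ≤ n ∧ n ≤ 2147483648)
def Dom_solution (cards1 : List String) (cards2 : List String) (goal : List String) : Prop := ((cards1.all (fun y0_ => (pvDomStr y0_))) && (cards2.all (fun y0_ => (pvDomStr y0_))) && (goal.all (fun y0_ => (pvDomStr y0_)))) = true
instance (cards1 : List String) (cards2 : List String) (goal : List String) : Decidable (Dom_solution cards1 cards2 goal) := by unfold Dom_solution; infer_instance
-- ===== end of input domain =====

-- B replaces A's list.remove consumption of the stacks by two advancing index pointers into the
-- untouched lists. Note: Python A mutates cards1/cards2 in place; B does not — the equivalence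
-- proved here is about the return value only.

-- ===== PORT A =====
-- A's loop over goal, carrying the (shrinking) card stacks; cards1.remove(g) with g == cards1[0]
-- removes the first occurrence (PySem.List.remove?; getD is never taken: g is the head, so it is present).
def solutionGoA (goal : List String) (c1 : List String) (c2 : List String) : String :=
  match goal with
  | [] => "Yes"
  | g :: gs =>
    if c1 ≠ [] ∧ c1.head? = some g then
      solutionGoA gs ((PySem.List.remove? c1 g).getD c1) c2
    else if c2 ≠ [] ∧ c2.head? = some g then
      solutionGoA gs c1 ((PySem.List.remove? c2 g).getD c2)
    else "No"

def solution (cards1 : List String) (cards2 : List String) (goal : List String) : String :=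
  solutionGoA goal cards1 cards2

-- ===== PORT B =====
-- B's loop over goal, carrying two index pointers i, j into the untouched lists.
def solutionGoB (cards1 : List String) (cards2 : List String) (goal : List String)
    (i : Int) (j : Int) : String :=
  match goal with
  | [] => "Yes"
  | g :: gs =>
    if i < (cards1.length : Int) ∧ PySem.List.pyGet? cards1 i = some g then
      solutionGoB cards1 cards2 gs (i + 1) j
    else if j < (cards2.length : Int) ∧ PySem.List.pyGet? cards2 j = some g then
      solutionGoB cards1 cards2 gs i (j + 1)
    else "No"

def solution_alt (cards1 : List String) (cards2 : List String) (goal : List String) : String :=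
  solutionGoB cards1 cards2 goal 0 0

-- ===== PRECONDITION & SPEC =====
def Spec_solution (cards1 : List String) (cards2 : List String) (goal : List String) (out : String) : Prop := out = solution_alt cards1 cards2 goal
instance (cards1 : List String) (cards2 : List String) (goal : List String) (out : String) : Decidable (Spec_solution cards1 cards2 goal out) := by unfold Spec_solution; infer_instance

-- ===== CLAIM (what is proved, stated in full; the proofs are below) =====
def Claim_equal_solution : Prop := ∀ (cards1 : List String) (cards2 : List String) (goal : List String), Dom_solution cards1 cards2 goal → Spec_solution cards1 cards2 goal (solution cards1 cards2 goal)

-- ===== LEMMAS AND PROOFS =====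

-- A's state (the suffixes of the stacks) corresponds to B's index pointers.
theorem solutionGo_eq (goal : List String) : ∀ (d1 d2 : List String) (i j : Nat),
    solutionGoA goal (d1.drop i) (d2.drop j) = solutionGoB d1 d2 goal (i : Int) (j : Int) := by
  induction goal with
  | nil => intro d1 d2 i j; rfl
  | cons g gs ih =>
    intro d1 d2 i j
    have cond : ∀ (d : List String) (k : Nat),
        (d.drop k ≠ [] ∧ (d.drop k).head? = some g) ↔
        ((k : Int) < (d.length : Int) ∧ PySem.List.pyGet? d (k : Int) = some g) := by
      intro d k
      rw [PySem.List.pyGet?_natCast]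
      constructor
      · rintro ⟨hne, hh⟩
        have hk : k < d.length := by
          by_contra h
          exact hne (List.drop_eq_nil_of_le (by omega))
        refine ⟨by exact_mod_cast hk, ?_⟩
        rwa [List.head?_drop] at hh
      · rintro ⟨hk, hh⟩
        have hk' : k < d.length := by exact_mod_cast hk
        refine ⟨?_, ?_⟩
        · simp [List.drop_eq_nil_iff]; omega
        · rwa [List.head?_drop]
    have step : ∀ (d : List String) (k : Nat), d.drop k ≠ [] → (d.drop k).head? = some g →
        (PySem.List.remove? (d.drop k) g).getD (d.drop k) = d.drop (k + 1) := by
      intro d k hne hh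
      match he : d.drop k with
      | [] => exact absurd he hne
      | x :: xs =>
        have hx : x = g := by rw [he] at hh; simpa using hh
        subst hx
        have : d.drop (k + 1) = xs := by
          have h := (List.tail_drop (l := d) (i := k)).symm
          rw [he] at h; simpa using h
        simp [PySem.List.remove?_cons_self, this]
    simp only [solutionGoA, solutionGoB]
    by_cases h1 : d1.drop i ≠ [] ∧ (d1.drop i).head? = some g
    · rw [if_pos h1, if_pos ((cond d1 i).mp h1)]
      rw [step d1 i h1.1 h1.2]
      have := ih d1 d2 (i + 1) j
      simpa [Int.natCast_add] using this
    · rw [if_neg h1, if_neg (fun hc => h1 ((cond d1 i).mpr hc))]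
      by_cases h2 : d2.drop j ≠ [] ∧ (d2.drop j).head? = some g
      · rw [if_pos h2, if_pos ((cond d2 j).mp h2)]
        rw [step d2 j h2.1 h2.2]
        have := ih d1 d2 i (j + 1)
        simpa [Int.natCast_add] using this
      · rw [if_neg h2, if_neg (fun hc => h2 ((cond d2 j).mpr hc))]

-- ===== VERDICT (by name: the statement is the Claim_ definition above) =====
theorem solution_spec : Claim_equal_solution := by
  intro cards1 cards2 goal _
  unfold Spec_solution solution solution_alt
  have := solutionGo_eq goal cards1 cards2 0 0
  simpa using this
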